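-- pv_equiv track=rewrite | github.com/BamBalaam/advent-of-code | 2023/day6/day6.py | get_times_and_distances
-- ===== SOURCE A (Python) =====
-- def get_times_and_distances(lines):
--     times, distances = [], []
--     for i in range(len(lines)):
--         clean_line = lines[i].split(":")[1].strip().split(" ")
--         clean_line = list(filter(lambda x: x != '', clean_line))
--         clean_line = list(map(int, clean_line))
--         if i == 0:
--             times = clean_line
--         else:
--             distances = clean_line
--     return times, distances
-- ===== SOURCE B (Python) =====
-- def get_times_and_distances(lines):
--     def nums(line):
--         return [int(x) for x in line.split(":")[1].strip().split(" ") if x != '']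
--     times = nums(lines[0]) if lines else []
--     distances = nums(lines[-1]) if len(lines) > 1 else []
--     return times, distances
-- ===== Notes on version B (the rewrite author's own statement) =====
-- stated objective: simpler
-- what changed: A's index loop over every line (overwriting distances on each later line) is replaced by a nums(line) helper applied directly to the two meaningful lines, lines[0] and lines[-1]; middle lines are never parsed.
import Mathlib
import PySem

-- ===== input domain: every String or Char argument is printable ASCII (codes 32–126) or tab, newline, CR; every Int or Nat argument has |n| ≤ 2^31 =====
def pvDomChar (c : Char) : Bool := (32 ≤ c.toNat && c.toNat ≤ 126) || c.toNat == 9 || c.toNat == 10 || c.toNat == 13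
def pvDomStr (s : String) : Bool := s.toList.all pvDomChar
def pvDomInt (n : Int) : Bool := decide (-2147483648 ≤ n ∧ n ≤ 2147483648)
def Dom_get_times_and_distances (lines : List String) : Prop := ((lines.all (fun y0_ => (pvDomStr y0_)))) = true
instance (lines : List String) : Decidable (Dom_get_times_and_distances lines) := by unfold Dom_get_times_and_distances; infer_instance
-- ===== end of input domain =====

-- B replaces A's index loop over all lines (overwriting `distances` each time) by direct
-- indexing of the two meaningful lines (lines[0] and lines[-1]); simpler, and skips middle lines.

-- ===== PORT A =====
-- the per-line pipeline of A's loop body: lines[i].split(":")[1].strip().split(" "),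
-- filter out '', map int.  `.getD 0` is never hit under Pre_ (int(x) raising is excluded there).
def pvParseA (line : String) : List Int :=
  let clean0 := (PySem.Str.split? (PySem.Str.strip (PySem.List.pyGetD ((PySem.Str.split? line ":").getD []) 1 "")) " ").getD []
  let clean1 := clean0.filter (fun x => x != "")
  clean1.map (fun x => (PySem.Int.ofStr? x).getD 0)

-- the loop body of A: compute clean_line from lines[i]; index 0 sets times, later indices distances
def pvStep (lines : List String) (td : List Int × List Int) (i : Int) : List Int × List Int :=
  let clean_line := pvParseA (PySem.List.pyGetD lines i "")
  if i = 0 then (clean_line, td.2) else (td.1, clean_line)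

def get_times_and_distances (lines : List String) : List Int × List Int :=
  (PySem.List.pyRange 0 (lines.length : Int)).foldl (pvStep lines) ([], [])

-- ===== PORT B =====
-- nums(line) = [int(x) for x in line.split(":")[1].strip().split(" ") if x != '']
def pvNums (line : String) : List Int :=
  (((PySem.Str.split? (PySem.Str.strip (PySem.List.pyGetD ((PySem.Str.split? line ":").getD []) 1 "")) " ").getD []).filter
      (fun x => x != "")).map (fun x => (PySem.Int.ofStr? x).getD 0)

def get_times_and_distances_alt (lines : List String) : List Int × List Int :=
  let times := if lines.length ≠ 0 then pvNums (PySem.List.pyGetD lines 0 "") else []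
  let distances := if 1 < lines.length then pvNums (PySem.List.pyGetD lines (-1) "") else []
  (times, distances)

-- ===== PRECONDITION & SPEC =====
-- Pre_ excludes exactly the inputs where the Python A raises: a line with no ':'
-- (IndexError on split(":")[1]) or a token on which int() raises ValueError.
def Pre_get_times_and_distances (lines : List String) : Prop :=
  ∀ l ∈ lines, 2 ≤ ((PySem.Str.split? l ":").getD []).length ∧
    ∀ t ∈ (PySem.Str.split? (PySem.Str.strip (((PySem.Str.split? l ":").getD []).getD 1 "")) " ").getD [],
      t = "" ∨ (PySem.Int.ofStr? t).isSome

instance (lines : List String) : Decidable (Pre_get_times_and_distances lines) := by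
  unfold Pre_get_times_and_distances; infer_instance

def pvWitness_get_times_and_distances : List String := ["zz: 0 1 2 3 4 5"]

def Spec_get_times_and_distances (lines : List String) (out : List Int × List Int) : Prop := out = get_times_and_distances_alt lines
instance (lines : List String) (out : List Int × List Int) : Decidable (Spec_get_times_and_distances lines out) := by unfold Spec_get_times_and_distances; infer_instance

-- ===== CLAIM (what is proved, stated in full; the proofs are below) =====
def Claim_equal_get_times_and_distances : Prop := ∀ (lines : List String), Dom_get_times_and_distances lines → Pre_get_times_and_distances lines → Spec_get_times_and_distances lines (get_times_and_distances lines)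

-- ===== LEMMAS AND PROOFS =====

lemma pvNums_eq_parseA (l : String) : pvNums l = pvParseA l := rfl

lemma pvStep_zero (lines : List String) (td : List Int × List Int) :
    pvStep lines td 0 = (pvParseA (PySem.List.pyGetD lines 0 ""), td.2) := rfl

lemma pvStep_ne (lines : List String) (td : List Int × List Int) {i : Int} (h : i ≠ 0) :
    pvStep lines td i = (td.1, pvParseA (PySem.List.pyGetD lines i "")) := by
  simp [pvStep, h]

-- A's fold, peeled from the right: after the first n iterations (1 ≤ n) the state is
-- (parse of line 0, [] if only index 0 has run, else parse of line (n-1)).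
lemma pvFold_spec (lines : List String) (n : Nat) (h1 : 1 ≤ n) :
    (PySem.List.pyRange 0 (n : Int)).foldl (pvStep lines) ([], []) =
    (pvParseA (lines.getD 0 ""),
     if n = 1 then [] else pvParseA (lines.getD (n - 1) "")) := by
  induction n with
  | zero => omega
  | succ m ih =>
    rcases Nat.lt_or_ge 1 (m + 1) with h | h
    · have hm : 1 ≤ m := by omega
      have hcast : ((m + 1 : Nat) : Int) = (m : Int) + 1 := by push_cast; ring
      have hmpos : (0 : Int) < (m : Int) := by exact_mod_cast hm
      rw [hcast, PySem.List.pyRange_one_succ_right hmpos.le, List.foldl_append, ih hm,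
        List.foldl_cons, List.foldl_nil, pvStep_ne lines _ hmpos.ne',
        PySem.List.pyGetD_natCast lines m "", if_neg (by omega : ¬ m + 1 = 1),
        (by omega : m + 1 - 1 = m)]
    · have hm : m = 0 := by omega
      subst hm
      rw [(by norm_num : ((0 + 1 : Nat) : Int) = 0 + 1),
        PySem.List.pyRange_one_succ_right le_rfl]
      have hnil : PySem.List.pyRange 0 (0:Int) = [] := rfl
      rw [hnil, List.nil_append,
        List.foldl_cons, List.foldl_nil, pvStep_zero, PySem.List.pyGetD_zero,
        if_pos rfl]

-- ===== VERDICT (by name: the statement is the Claim_ definition above) =====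
theorem get_times_and_distances_spec : Claim_equal_get_times_and_distances := by
  intro lines _ _
  unfold Spec_get_times_and_distances get_times_and_distances get_times_and_distances_alt
  by_cases h0 : lines.length = 0
  · have : lines = [] := List.length_eq_zero_iff.mp h0
    subst this
    rfl
  · rw [pvFold_spec lines lines.length (by omega)]
    by_cases h1 : lines.length = 1
    · rw [if_pos h1]
      show _ = (if lines.length ≠ 0 then pvNums (PySem.List.pyGetD lines 0 "") else [],
        if 1 < lines.length then pvNums (PySem.List.pyGetD lines (-1) "") else [])
      rw [if_pos h0, if_neg (by omega), pvNums_eq_parseA, PySem.List.pyGetD_zero]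
    · have hne : lines ≠ [] := by
        intro h; exact h0 (by simp [h])
      rw [if_neg h1]
      show _ = (if lines.length ≠ 0 then pvNums (PySem.List.pyGetD lines 0 "") else [],
        if 1 < lines.length then pvNums (PySem.List.pyGetD lines (-1) "") else [])
      rw [if_pos h0, if_pos (by omega), pvNums_eq_parseA, pvNums_eq_parseA,
        PySem.List.pyGetD_zero, PySem.List.pyGetD_neg_one lines "" hne]
      have hgd : lines.getD (lines.length - 1) "" = lines.getLast hne := by
        rw [List.getLast_eq_getElem, List.getD_eq_getElem lines "" (by omega)]
      rw [hgd]
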